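-- pv_equiv track=rewrite | github.com/yuyemo/cs61a | 作业/lesson11/double_eight.py | double_eight
-- ===== SOURCE A (Python) =====
-- def double_eight(k):
--     if k<10:
--         return False
--     last_two,all_but_last=k%100,k//10
--     if last_two==88:
--         return True
--     else:
--         return double_eight(all_but_last)
-- ===== SOURCE B (Python) =====
-- def double_eight(k):
--     return k >= 10 and '88' in str(k)
-- ===== Notes on version B (the rewrite author's own statement) =====
-- stated objective: idiomatic
-- what changed: Replaces the recursive arithmetic digit-peeling (mod/floor-division) with a single substring test for '88' in str(k), guarded by the same two-digit threshold as A's base case so negatives and single digits stay False.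
import Mathlib
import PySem

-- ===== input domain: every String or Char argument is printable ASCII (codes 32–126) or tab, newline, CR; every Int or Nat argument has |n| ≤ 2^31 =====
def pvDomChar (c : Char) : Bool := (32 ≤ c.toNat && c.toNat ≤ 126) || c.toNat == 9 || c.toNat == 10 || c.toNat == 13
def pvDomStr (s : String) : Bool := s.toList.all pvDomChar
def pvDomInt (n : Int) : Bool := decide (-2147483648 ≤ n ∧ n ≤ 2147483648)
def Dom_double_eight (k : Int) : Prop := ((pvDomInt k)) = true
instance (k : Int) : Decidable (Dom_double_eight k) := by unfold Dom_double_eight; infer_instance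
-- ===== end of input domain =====

-- B replaces A's %100 / //10 recursive digit-peeling with str(k) plus a '88' substring test (idiomatic; same cost).


-- ===== PORT A =====
def double_eight (k : Int) : Bool :=
  if k < 10 then false
  else if PySem.Int.mod k 100 == 88 then true
  else double_eight (PySem.Int.floordiv k 10)
termination_by k.toNat
decreasing_by
  rename_i h _
  have he : PySem.Int.floordiv k 10 = k / 10 := PySem.Int.floordiv_eq_ediv_of_pos (by omega)
  rw [he]; omega

-- ===== PORT B =====
def double_eight_alt (k : Int) : Bool :=
  decide (10 ≤ k) && PySem.Str.isIn "88" (PySem.Int.toStr k)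

-- ===== PRECONDITION & SPEC =====
def Spec_double_eight (k : Int) (out : Bool) : Prop := out = double_eight_alt k
instance (k : Int) (out : Bool) : Decidable (Spec_double_eight k out) := by unfold Spec_double_eight; infer_instance

-- ===== CLAIM (what is proved, stated in full; the proofs are below) =====
def Claim_equal_double_eight : Prop := ∀ (k : Int), Dom_double_eight k → Spec_double_eight k (double_eight k)

-- ===== LEMMAS AND PROOFS =====

/-- The decimal digit characters of `n`, most significant first (= `Nat.toDigits 10 n`). -/
def pvDchars (n : Nat) : List Char :=
  if n < 10 then [Nat.digitChar n]
  else pvDchars (n / 10) ++ [Nat.digitChar (n % 10)]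
decreasing_by omega

lemma pvDchars_lt (n : Nat) (h : n < 10) : pvDchars n = [Nat.digitChar n] := by
  rw [pvDchars, if_pos h]

lemma pvDchars_ge (n : Nat) (h : ¬ n < 10) :
    pvDchars n = pvDchars (n / 10) ++ [Nat.digitChar (n % 10)] := by
  rw [pvDchars, if_neg h]

lemma pvCore_eq : ∀ (f n : Nat) (ds : List Char), n < f →
    Nat.toDigitsCore 10 f n ds = pvDchars n ++ ds := by
  intro f
  induction f with
  | zero => omega
  | succ f ih =>
    intro n ds h
    rw [Nat.toDigitsCore]
    by_cases h10 : n < 10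
    · have : n / 10 = 0 := by omega
      simp only [this, reduceIte]
      rw [pvDchars_lt n h10, Nat.mod_eq_of_lt h10]
      simp
    · have hne : n / 10 ≠ 0 := by omega
      simp only [if_neg hne]
      rw [ih (n / 10) _ (by omega), pvDchars_ge n h10, List.append_assoc]
      simp

lemma pvToDigits_eq (n : Nat) : Nat.toDigits 10 n = pvDchars n := by
  have := pvCore_eq (n + 1) n [] (by omega)
  simpa [Nat.toDigits] using this

lemma pvDigitChar_eq8 (d : Nat) (h : d < 10) : Nat.digitChar d = '8' ↔ d = 8 := by
  interval_cases d <;> simp [Nat.digitChar]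

lemma pvHead_rev (m : Nat) : ∃ t, (pvDchars m).reverse = Nat.digitChar (m % 10) :: t := by
  by_cases h : m < 10
  · exact ⟨[], by rw [pvDchars_lt m h, Nat.mod_eq_of_lt h]; simp⟩
  · exact ⟨(pvDchars (m / 10)).reverse, by rw [pvDchars_ge m h]; simp⟩

lemma pvRev88 (l : List Char) : (['8','8'] <:+: l.reverse) ↔ (['8','8'] <:+: l) := by
  constructor
  · intro h
    exact List.reverse_infix.mp (by simpa using h)
  · intro h
    simpa using List.reverse_infix.mpr h

lemma pvInf_step (n : Nat) (h : 10 ≤ n) :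
    (['8','8'] <:+: (pvDchars n).reverse) ↔
      (n % 100 = 88 ∨ ['8','8'] <:+: (pvDchars (n / 10)).reverse) := by
  obtain ⟨t, ht⟩ := pvHead_rev (n / 10)
  have hstep : (pvDchars n).reverse = Nat.digitChar (n % 10) :: (pvDchars (n / 10)).reverse := by
    rw [pvDchars_ge n (by omega)]; simp
  have h1 : n % 10 < 10 := by omega
  have h2 : (n / 10) % 10 < 10 := by omega
  have hP2 : (['8','8'] <+: Nat.digitChar (n % 10) :: Nat.digitChar (n / 10 % 10) :: t)
      ↔ n % 100 = 88 := by
    simp only [List.cons_prefix_cons, List.nil_prefix, and_true]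
    constructor
    · rintro ⟨e1, e2⟩
      have d1 := (pvDigitChar_eq8 _ h1).mp e1.symm
      have d2 := (pvDigitChar_eq8 _ h2).mp e2.symm
      omega
    · intro h88
      have e1 : n % 10 = 8 := by omega
      have e2 : n / 10 % 10 = 8 := by omega
      rw [e1, e2]
      exact ⟨by decide, by decide⟩
  rw [hstep, ht]
  simp only [List.infix_cons_iff, hP2]

lemma pvKey : ∀ n : Nat, double_eight (n : Int) = decide (['8','8'] <:+: (pvDchars n).reverse) := by
  intro n
  induction n using Nat.strong_induction_on with
  | _ n ih =>
    by_cases h10 : n < 10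
    · rw [double_eight, if_pos (by exact_mod_cast h10)]
      have hr : (pvDchars n).reverse = [Nat.digitChar n] := by
        rw [pvDchars, if_pos h10]; simp
      have : ¬ (['8','8'] <:+: (pvDchars n).reverse) := by
        rw [hr]; intro h; have := h.length_le; simp at this
      simp [this]
    · have hm : PySem.Int.mod (n : Int) 100 = ((n % 100 : Nat) : Int) := by
        exact_mod_cast PySem.Int.mod_natCast n 100
      have hf : PySem.Int.floordiv (n : Int) 10 = ((n / 10 : Nat) : Int) := by
        exact_mod_cast PySem.Int.floordiv_natCast n 10
      rw [double_eight, if_neg (by exact_mod_cast h10), hm, hf]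
      rw [ih (n / 10) (by omega)]
      by_cases h88 : n % 100 = 88
      · have : ((n % 100 : Nat) : Int) == (88 : Int) := by simp [h88]
        rw [if_pos this]
        simp [(pvInf_step n (by omega)).mpr (Or.inl h88)]
      · have : ¬ (((n % 100 : Nat) : Int) == (88 : Int)) := by
          simp; omega
        rw [if_neg this]
        have := pvInf_step n (by omega)
        by_cases hi : ['8','8'] <:+: (pvDchars (n / 10)).reverse
        · simp [hi, this.mpr (Or.inr hi)]
        · have : ¬ (['8','8'] <:+: (pvDchars n).reverse) := fun hh => by
            rcases this.mp hh with h' | h' <;> [exact h88 h'; exact hi h']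
          simp [hi, this]

lemma pvAlt_eq (n : Nat) (h : 10 ≤ n) :
    double_eight_alt (n : Int) = decide (['8','8'] <:+: pvDchars n) := by
  unfold double_eight_alt
  have hg : decide ((10:Int) ≤ (n : Int)) = true := by simp; exact_mod_cast h
  rw [hg, Bool.true_and, Bool.eq_iff_iff]
  rw [PySem.Str.isIn_iff_infix]
  have hc : (PySem.Int.toStr (n : Int)).toList = pvDchars n := by
    rw [PySem.Int.toList_toStr, PySem.Int.toChars, if_neg (by exact_mod_cast Int.not_lt.mpr (Int.natCast_nonneg n))]
    simpa using pvToDigits_eq n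
  rw [hc]
  simp

-- ===== VERDICT (by name: the statement is the Claim_ definition above) =====
theorem double_eight_spec : Claim_equal_double_eight := by
  intro k _
  unfold Spec_double_eight
  by_cases hk : k < 10
  · rw [double_eight, if_pos hk]
    unfold double_eight_alt
    simp [Int.not_le.mpr hk]
  · have hk0 : 0 ≤ k := by omega
    obtain ⟨n, rfl⟩ : ∃ n : Nat, k = (n : Int) := ⟨k.toNat, (Int.toNat_of_nonneg hk0).symm⟩
    have hn : 10 ≤ n := by exact_mod_cast Int.not_lt.mp hk
    rw [pvKey n, pvAlt_eq n hn]
    simp [pvRev88]
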